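-- pv_equiv track=rewrite | github.com/iron-island/adventofcode | solutions/2024/12.py | vertical_scan
-- ===== SOURCE A (Python) =====
-- def vertical_scan(fences_list):
--     MIN_ROW = 1000000
--     MIN_COL = 1000000
--     MAX_ROW = -100000
--     MAX_COL = -100000
--     for coords in fences_list:
--         row, col = coords
--
--         MIN_ROW = min(MIN_ROW, row)
--         MIN_COL = min(MIN_COL, col)
--         MAX_ROW = max(MAX_ROW, row)
--         MAX_COL = max(MAX_COL, col)
--
--     sides = 0
--     for col in range(MIN_COL, MAX_COL+1):
--         started_side = False
--         for row in range(MIN_ROW, MAX_ROW+1):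
--             n_tuple = (row, col)
--
--             if (started_side == False) and (n_tuple in fences_list):
--                 started_side = True
--             elif (started_side) and (n_tuple not in fences_list):
--                 # Side has ended
--                 started_side = False
--                 sides += 1
--
--         if (started_side):
--             sides += 1
--
--     return sides
-- ===== SOURCE B (Python) =====
-- def vertical_scan(fences_list):
--     # A vertical run starts at every fence cell whose upper neighbour is absent:
--     # count run-starts in one pass over the distinct cells.
--     cells = set(fences_list)
--     return sum(1 for (row, col) in cells if (row - 1, col) not in cells)
-- ===== Notes on version B (the rewrite author's own statement) =====
-- stated objective: faster
-- what changed: A scans every (row,col) of the bounding box with a linear membership test per cell to count where vertical runs end; B builds a set of the distinct cells once and in a single pass counts run-starts, i.e. cells whose upper neighbour is absent.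
import Mathlib
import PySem

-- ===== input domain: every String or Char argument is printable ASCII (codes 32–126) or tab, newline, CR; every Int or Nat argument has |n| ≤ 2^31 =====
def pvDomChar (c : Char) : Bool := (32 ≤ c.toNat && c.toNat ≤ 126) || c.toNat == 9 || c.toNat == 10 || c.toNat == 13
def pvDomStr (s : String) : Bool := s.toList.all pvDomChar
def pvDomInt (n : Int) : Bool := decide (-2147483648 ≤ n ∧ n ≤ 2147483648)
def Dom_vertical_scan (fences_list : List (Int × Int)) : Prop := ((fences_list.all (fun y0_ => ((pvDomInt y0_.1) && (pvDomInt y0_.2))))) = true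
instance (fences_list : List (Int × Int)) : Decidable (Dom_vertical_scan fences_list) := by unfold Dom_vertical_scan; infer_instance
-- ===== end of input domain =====

-- B replaces A's bounding-box double scan with one pass counting run-starts over the distinct cells (objective: faster).

-- ===== PORT A =====
-- body of A's bounds-accumulating first loop
def vsBnd (b : Int × Int × Int × Int) (coords : Int × Int) : Int × Int × Int × Int :=
  (min b.1 coords.1, min b.2.1 coords.2, max b.2.2.1 coords.1, max b.2.2.2 coords.2)

-- body of A's inner row loop: state = (started_side, sides)
def vsStep (fences_list : List (Int × Int)) (col : Int) (st : Bool × Int) (row : Int) : Bool × Int :=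
  if st.1 = false ∧ fences_list.contains (row, col) = true then (true, st.2)
  else if st.1 = true ∧ ¬ fences_list.contains (row, col) = true then (false, st.2 + 1)
  else st

def vertical_scan (fences_list : List (Int × Int)) : Int :=
  -- bs = (MIN_ROW, MIN_COL, MAX_ROW, MAX_COL) after the first loop
  let bs := fences_list.foldl vsBnd (1000000, 1000000, -100000, -100000)
  -- for col in range(MIN_COL, MAX_COL+1): scan range(MIN_ROW, MAX_ROW+1); '+1' at column end if a side is open
  (PySem.List.pyRange bs.2.1 (bs.2.2.2 + 1) 1).foldl
    (fun sides col =>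
      let st := (PySem.List.pyRange bs.1 (bs.2.2.1 + 1) 1).foldl (vsStep fences_list col) (false, sides)
      if st.1 = true then st.2 + 1 else st.2)
    0

-- ===== PORT B =====
def vertical_scan_alt (fences_list : List (Int × Int)) : Int :=
  let cells : PySem.Set (Int × Int) := PySem.Set.ofList fences_list
  ((cells.filter (fun p => !(PySem.Set.contains cells (p.1 - 1, p.2)))).length : Int)

-- ===== PRECONDITION & SPEC =====
def Spec_vertical_scan (fences_list : List (Int × Int)) (out : Int) : Prop := out = vertical_scan_alt fences_list
instance (fences_list : List (Int × Int)) (out : Int) : Decidable (Spec_vertical_scan fences_list out) := by unfold Spec_vertical_scan; infer_instance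

-- ===== CLAIM (what is proved, stated in full; the proofs are below) =====
def Claim_equal_vertical_scan : Prop := ∀ (fences_list : List (Int × Int)), Dom_vertical_scan fences_list → Spec_vertical_scan fences_list (vertical_scan fences_list)

-- ===== LEMMAS AND PROOFS =====

theorem vsStep_eq (l : List (Int × Int)) (c : Int) (st : Bool × Int) (r : Int) :
    vsStep l c st r
      = (l.contains (r, c), st.2 + if st.1 = true ∧ l.contains (r, c) = false then 1 else 0) := by
  obtain ⟨b, s⟩ := st
  cases b <;> cases h : l.contains (r, c) <;> simp [vsStep] <;>
    first
      | exact List.contains_iff_mem.mp h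
      | simpa using h

-- the bounds fold only moves mins down and maxes up
theorem vsBnd_mono (l : List (Int × Int)) : ∀ (init : Int × Int × Int × Int),
    (l.foldl vsBnd init).1 ≤ init.1 ∧ (l.foldl vsBnd init).2.1 ≤ init.2.1 ∧
      init.2.2.1 ≤ (l.foldl vsBnd init).2.2.1 ∧ init.2.2.2 ≤ (l.foldl vsBnd init).2.2.2 := by
  induction l with
  | nil => intro init; simp
  | cons q t ih =>
    intro init
    have h := ih (vsBnd init q)
    simp only [List.foldl_cons]
    refine ⟨le_trans h.1 ?_, le_trans h.2.1 ?_, le_trans ?_ h.2.2.1, le_trans ?_ h.2.2.2⟩ <;>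
      simp [vsBnd]

-- every cell of the list lies inside the computed bounding box
theorem vsBnd_bounds (l : List (Int × Int)) : ∀ (init : Int × Int × Int × Int), ∀ p ∈ l,
    (l.foldl vsBnd init).1 ≤ p.1 ∧ (l.foldl vsBnd init).2.1 ≤ p.2 ∧
      p.1 ≤ (l.foldl vsBnd init).2.2.1 ∧ p.2 ≤ (l.foldl vsBnd init).2.2.2 := by
  induction l with
  | nil => intro init p hp; simp at hp
  | cons q t ih =>
    intro init p hp
    simp only [List.foldl_cons]
    rcases List.mem_cons.1 hp with h | h
    · subst h
      have hm := vsBnd_mono t (vsBnd init p)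
      have h1 : (vsBnd init p).1 ≤ p.1 := by simp [vsBnd]
      have h2 : (vsBnd init p).2.1 ≤ p.2 := by simp [vsBnd]
      have h3 : p.1 ≤ (vsBnd init p).2.2.1 := by simp [vsBnd]
      have h4 : p.2 ≤ (vsBnd init p).2.2.2 := by simp [vsBnd]
      exact ⟨le_trans hm.1 h1, le_trans hm.2.1 h2, le_trans h3 hm.2.2.1, le_trans h4 hm.2.2.2⟩
    · exact ih (vsBnd init q) p h

-- A's inner loop over a row range, started from the membership flag of row a-1,
-- finished with the trailing '+1', counts the run starts in the range (plus one if already open).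
theorem inner_loop (l : List (Int × Int)) (c : Int) : ∀ (n : Nat) (a s b : Int), (b - a).toNat = n →
    (if ((PySem.List.pyRange a b 1).foldl (vsStep l c) (l.contains (a - 1, c), s)).1 = true
     then ((PySem.List.pyRange a b 1).foldl (vsStep l c) (l.contains (a - 1, c), s)).2 + 1
     else ((PySem.List.pyRange a b 1).foldl (vsStep l c) (l.contains (a - 1, c), s)).2)
    = s + ((PySem.List.pyRange a b 1).countP
            (fun r => l.contains (r, c) && !l.contains (r - 1, c)) : Int)
        + (if l.contains (a - 1, c) = true then 1 else 0) := by
  intro n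
  induction n with
  | zero =>
    intro a s b h
    rw [PySem.List.pyRange_one_eq_nil (by omega)]
    simp only [List.foldl_nil, List.countP_nil, Nat.cast_zero, add_zero]
    split <;> omega
  | succ n ih =>
    intro a s b h
    rw [PySem.List.pyRange_one_cons (by omega : a < b), List.foldl_cons, vsStep_eq,
      List.countP_cons]
    have key := ih (a + 1) (s + if l.contains (a - 1, c) = true ∧ l.contains (a, c) = false then 1 else 0) b (by omega)
    simp only [add_sub_cancel_right] at key
    rw [key]
    push_cast
    cases h1 : l.contains (a - 1, c) <;> cases h2 : l.contains (a, c) <;>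
      simp <;> omega

-- per column: run starts counted over the row range = cells of that column whose upper neighbour is absent
theorem colcount (l : List (Int × Int)) {R0 R1 : Int}
    (hR : ∀ p ∈ l, R0 ≤ p.1 ∧ p.1 ≤ R1) (c : Int) :
    ((PySem.List.pyRange R0 (R1 + 1) 1).countP
        (fun r => l.contains (r, c) && !l.contains (r - 1, c)))
      = (({p ∈ l.toFinset | (p.1 - 1, p.2) ∉ l}).filter (fun p => p.2 = c)).card := by
  rw [List.countP_eq_length_filter,
    ← List.toFinset_card_of_nodup ((PySem.List.nodup_pyRange_one _ _).filter _),
    List.toFinset_filter]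
  apply Finset.card_nbij' (fun r => (r, c)) Prod.fst
  · intro r hr
    simp only [Finset.coe_filter, Finset.mem_filter, Set.mem_setOf_eq,
      List.mem_toFinset, PySem.List.mem_pyRange_one, Bool.and_eq_true, Bool.not_eq_true'] at hr ⊢
    obtain ⟨_, hb1, hb2⟩ := hr
    refine ⟨⟨List.contains_iff_mem.mp hb1, ?_⟩, trivial⟩
    intro hmem
    rw [List.contains_iff_mem.mpr hmem] at hb2
    exact Bool.true_eq_false.mp hb2
  · intro p hp
    simp only [Finset.coe_filter, Finset.mem_filter, Set.mem_setOf_eq,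
      List.mem_toFinset, PySem.List.mem_pyRange_one, Bool.and_eq_true, Bool.not_eq_true'] at hp ⊢
    obtain ⟨⟨h1, h2⟩, h3⟩ := hp
    have hb := hR p h1
    refine ⟨⟨hb.1, by omega⟩, ?_, ?_⟩
    · rw [← h3]; exact List.contains_iff_mem.mpr h1
    · rw [← h3]
      cases hc : l.contains (p.1 - 1, p.2)
      · rfl
      · exact absurd (List.contains_iff_mem.mp hc) h2
  · intro r _; rfl
  · intro p hp
    simp only [Finset.coe_filter, Set.mem_setOf_eq] at hp
    exact Prod.ext rfl hp.2.symm

-- B counts exactly the distinct cells whose upper neighbour is absent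
theorem b_count (l : List (Int × Int)) :
    vertical_scan_alt l = (({p ∈ l.toFinset | (p.1 - 1, p.2) ∉ l}).card : Int) := by
  rw [show vertical_scan_alt l
      = ((((PySem.Set.ofList l).filter
            (fun p => !(PySem.Set.contains (PySem.Set.ofList l) (p.1 - 1, p.2)))).length : Nat) : Int)
    from rfl]
  congr 1
  rw [← List.toFinset_card_of_nodup ((PySem.Set.nodup_ofList l).filter _),
    List.toFinset_filter]
  congr 1
  ext p
  simp only [Finset.mem_filter, List.mem_toFinset, PySem.Set.mem_ofList,
    PySem.Set.contains, Bool.not_eq_true']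
  constructor
  · rintro ⟨h1, h2⟩
    refine ⟨h1, fun hmem => ?_⟩
    rw [List.contains_iff_mem.mpr ((PySem.Set.mem_ofList l _).mpr hmem)] at h2
    exact Bool.true_eq_false.mp h2
  · rintro ⟨h1, h2⟩
    refine ⟨h1, ?_⟩
    cases hc : List.contains (PySem.Set.ofList l) (p.1 - 1, p.2)
    · rfl
    · exact absurd ((PySem.Set.mem_ofList l _).mp (List.contains_iff_mem.mp hc)) h2

theorem vs_main (l : List (Int × Int)) : vertical_scan l = vertical_scan_alt l := by
  have hbd := vsBnd_bounds l (1000000, 1000000, -100000, -100000)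
  simp only [vertical_scan]
  set B := l.foldl vsBnd (1000000, 1000000, -100000, -100000) with hB
  have hnomem : ∀ c : Int, l.contains (B.1 - 1, c) = false := by
    intro c
    cases h : l.contains (B.1 - 1, c)
    · rfl
    · have := (hbd (B.1 - 1, c) (List.contains_iff_mem.mp h)).1
      omega
  have hrows : ∀ p ∈ l, B.1 ≤ p.1 ∧ p.1 ≤ B.2.2.1 :=
    fun p hp => ⟨(hbd p hp).1, (hbd p hp).2.2.1⟩
  have hcols : ∀ p ∈ l, B.2.1 ≤ p.2 ∧ p.2 ≤ B.2.2.2 :=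
    fun p hp => ⟨(hbd p hp).2.1, (hbd p hp).2.2.2⟩
  have hout : (PySem.List.pyRange B.2.1 (B.2.2.2 + 1) 1).foldl
      (fun sides col =>
        if ((PySem.List.pyRange B.1 (B.2.2.1 + 1) 1).foldl (vsStep l col) (false, sides)).1 = true
        then ((PySem.List.pyRange B.1 (B.2.2.1 + 1) 1).foldl (vsStep l col) (false, sides)).2 + 1
        else ((PySem.List.pyRange B.1 (B.2.2.1 + 1) 1).foldl (vsStep l col) (false, sides)).2) 0
      = (PySem.List.pyRange B.2.1 (B.2.2.2 + 1) 1).foldl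
        (fun sides col => sides +
          (((PySem.List.pyRange B.1 (B.2.2.1 + 1) 1).countP
            (fun r => l.contains (r, col) && !l.contains (r - 1, col))) : Int)) 0 := by
    apply List.foldl_ext
    intro s c _
    have h0 := inner_loop l c ((B.2.2.1 + 1 - B.1).toNat) B.1 s (B.2.2.1 + 1) rfl
    rw [hnomem c] at h0
    simpa using h0
  rw [hout, PySem.List.foldl_add, zero_add,
    ← List.sum_toFinset _ (PySem.List.nodup_pyRange_one B.2.1 (B.2.2.2 + 1)), b_count l,
    ← Nat.cast_sum]
  congr 1
  rw [Finset.sum_congr rfl (fun c _ => colcount l hrows c)]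
  have hmaps : ∀ p ∈ ({p ∈ l.toFinset | (p.1 - 1, p.2) ∉ l}),
      p.2 ∈ (PySem.List.pyRange B.2.1 (B.2.2.2 + 1) 1).toFinset := by
    intro p hp
    simp only [Finset.mem_filter, List.mem_toFinset] at hp
    have := hcols p hp.1
    rw [List.mem_toFinset, PySem.List.mem_pyRange_one]
    omega
  exact (Finset.card_eq_sum_card_fiberwise hmaps).symm

-- ===== VERDICT (by name: the statement is the Claim_ definition above) =====
theorem vertical_scan_spec : Claim_equal_vertical_scan := by
  intro l _
  unfold Spec_vertical_scan
  exact vs_main l
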